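-- pv_equiv track=rewrite | github.com/victorkolis/PythonMaster | CODEWARS/7kyu/ALPHABET_WAR/main.py | alphabet_war
-- ===== SOURCE A (Python) =====
-- def alphabet_war(fight):
-- 	left_side = {
-- 		'w': 4,
-- 		'p': 3,
-- 		'b': 2,
-- 		's': 1
-- 	}
--
-- 	right_side = {
-- 		'm': 4,
-- 		'q': 3,
-- 		'd': 2,
-- 		'z': 1
-- 	}
--
-- 	left_score = 0
-- 	right_score = 0
--
-- 	for letter in fight:
-- 		if letter in left_side:
-- 			try:
-- 				left_score += left_side[letter]
-- 			except KeyError: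
-- 				pass
-- 			except TypeError:
-- 				pass
-- 		else:
-- 			try:
-- 				right_score += right_side[letter]
-- 			except KeyError:
-- 				pass
-- 			except TypeError:
-- 				pass
--
-- 	result = left_score - right_score
--
-- 	if result > 0:
-- 		return 'Left side wins!'
--
-- 	elif result < 0:
-- 		return 'Right side wins!'
--
-- 	elif result == 0:
-- 		return 'Let\'s fight again!'
-- ===== SOURCE B (Python) =====
-- def alphabet_war(fight):
--     # Phase 1: frequency histogram of the letters.
--     counts = {}
--     for letter in fight:
--         counts[letter] = counts.get(letter, 0) + 1
--     # Phase 2: weighted scores straight from the eight relevant counts.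
--     left = (4 * counts.get('w', 0) + 3 * counts.get('p', 0)
--             + 2 * counts.get('b', 0) + counts.get('s', 0))
--     right = (4 * counts.get('m', 0) + 3 * counts.get('q', 0)
--              + 2 * counts.get('d', 0) + counts.get('z', 0))
--     if left > right:
--         return 'Left side wins!'
--     if right > left:
--         return 'Right side wins!'
--     return "Let's fight again!"
-- ===== Notes on version B (the rewrite author's own statement) =====
-- stated objective: alternative
-- what changed: Replaces A's score-as-you-scan loop (per-letter dict membership test, branch with dead try/except, two running scores) by two stages: one pass builds a frequency histogram, then both scores are computed as closed weighted sums of the eight relevant counts, moving the scoring arithmetic out of the per-character loop.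
import Mathlib
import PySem

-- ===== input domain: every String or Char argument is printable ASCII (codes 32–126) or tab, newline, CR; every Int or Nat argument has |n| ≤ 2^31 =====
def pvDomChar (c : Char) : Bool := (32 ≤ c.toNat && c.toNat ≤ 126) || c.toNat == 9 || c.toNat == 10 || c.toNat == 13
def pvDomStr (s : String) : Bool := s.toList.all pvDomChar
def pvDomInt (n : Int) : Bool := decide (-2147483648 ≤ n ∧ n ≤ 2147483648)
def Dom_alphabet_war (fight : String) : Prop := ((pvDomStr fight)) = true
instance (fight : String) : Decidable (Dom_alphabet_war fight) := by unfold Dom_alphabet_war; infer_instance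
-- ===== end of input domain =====

-- B is a two-stage alternative: a frequency histogram is built first, then both scores are weighted sums of the eight relevant counts (same cost as A).

-- ===== PORT A =====
def pvLeftSide : PySem.Dict Char Int :=
  PySem.Dict.ofList [('w', 4), ('p', 3), ('b', 2), ('s', 1)]

def pvRightSide : PySem.Dict Char Int :=
  PySem.Dict.ofList [('m', 4), ('q', 3), ('d', 2), ('z', 1)]

-- one iteration of A's for-loop; try/except KeyError: pass = 'none => unchanged'
def pvStepA (st : Int × Int) (letter : Char) : Int × Int :=
  if pvLeftSide.contains letter then
    match pvLeftSide.get? letter with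
    | some v => (st.1 + v, st.2)
    | none => st
  else
    match pvRightSide.get? letter with
    | some v => (st.1, st.2 + v)
    | none => st

def alphabet_war (fight : String) : String :=
  let st := fight.toList.foldl pvStepA (0, 0)
  let result := st.1 - st.2
  if result > 0 then "Left side wins!"
  else if result < 0 then "Right side wins!"
  else "Let's fight again!"

-- ===== PORT B =====
def alphabet_war_alt (fight : String) : String :=
  let counts : PySem.Dict Char Int :=
    fight.toList.foldl (fun d x => d.insert x (d.getD x 0 + 1)) PySem.Dict.empty
  let left := 4 * counts.getD 'w' 0 + 3 * counts.getD 'p' 0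
      + 2 * counts.getD 'b' 0 + counts.getD 's' 0
  let right := 4 * counts.getD 'm' 0 + 3 * counts.getD 'q' 0
      + 2 * counts.getD 'd' 0 + counts.getD 'z' 0
  if left > right then "Left side wins!"
  else if right > left then "Right side wins!"
  else "Let's fight again!"

-- ===== PRECONDITION & SPEC =====
def Spec_alphabet_war (fight : String) (out : String) : Prop := out = alphabet_war_alt fight
instance (fight : String) (out : String) : Decidable (Spec_alphabet_war fight out) := by unfold Spec_alphabet_war; infer_instance

-- ===== CLAIM (what is proved, stated in full; the proofs are below) =====
def Claim_equal_alphabet_war : Prop := ∀ (fight : String), Dom_alphabet_war fight → Spec_alphabet_war fight (alphabet_war fight)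

-- ===== LEMMAS AND PROOFS =====

theorem pvLeftSide_eq : pvLeftSide = PySem.Dict.mk [('w', 4), ('p', 3), ('b', 2), ('s', 1)] := by rfl
theorem pvRightSide_eq : pvRightSide = PySem.Dict.mk [('m', 4), ('q', 3), ('d', 2), ('z', 1)] := by rfl

-- A's fold computes the weighted character counts
theorem pvFoldA_counts (xs : List Char) (l r : Int) :
    xs.foldl pvStepA (l, r) =
      (l + 4 * xs.count 'w' + 3 * xs.count 'p' + 2 * xs.count 'b' + xs.count 's',
       r + 4 * xs.count 'm' + 3 * xs.count 'q' + 2 * xs.count 'd' + xs.count 'z') := by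
  induction xs generalizing l r with
  | nil => simp
  | cons c xs ih =>
    simp only [List.foldl_cons, ih, List.count_cons]
    by_cases hw : c = 'w'
    · subst hw; simp [pvStepA, pvLeftSide_eq, PySem.Dict.contains_mk, PySem.Dict.get?_mk_cons]
      ring
    by_cases hp : c = 'p'
    · subst hp; simp [pvStepA, pvLeftSide_eq, PySem.Dict.contains_mk, PySem.Dict.get?_mk_cons]
      ring
    by_cases hb : c = 'b'
    · subst hb; simp [pvStepA, pvLeftSide_eq, PySem.Dict.contains_mk, PySem.Dict.get?_mk_cons]
      ring
    by_cases hs : c = 's'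
    · subst hs; simp [pvStepA, pvLeftSide_eq, PySem.Dict.contains_mk, PySem.Dict.get?_mk_cons]
      ring
    by_cases hm : c = 'm'
    · subst hm; simp [pvStepA, pvLeftSide_eq, pvRightSide_eq, PySem.Dict.contains_mk, PySem.Dict.get?_mk_cons]
      ring
    by_cases hq : c = 'q'
    · subst hq; simp [pvStepA, pvLeftSide_eq, pvRightSide_eq, PySem.Dict.contains_mk, PySem.Dict.get?_mk_cons]
      ring
    by_cases hd : c = 'd'
    · subst hd; simp [pvStepA, pvLeftSide_eq, pvRightSide_eq, PySem.Dict.contains_mk, PySem.Dict.get?_mk_cons]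
      ring
    by_cases hz : c = 'z'
    · subst hz; simp [pvStepA, pvLeftSide_eq, pvRightSide_eq, PySem.Dict.contains_mk, PySem.Dict.get?_mk_cons]
      ring
    · simp [pvStepA, pvLeftSide_eq, pvRightSide_eq, PySem.Dict.contains_mk,
        PySem.Dict.get?, hw, hp, hb, hs, hm, hq, hd, hz,
        Ne.symm hw, Ne.symm hp, Ne.symm hb, Ne.symm hs, Ne.symm hm, Ne.symm hq, Ne.symm hd, Ne.symm hz]

-- ===== VERDICT (by name: the statement is the Claim_ definition above) =====
theorem alphabet_war_spec : Claim_equal_alphabet_war := by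
  intro fight _
  unfold Spec_alphabet_war alphabet_war alphabet_war_alt
  simp only [pvFoldA_counts, PySem.Dict.getD_foldl_insert_add_one, PySem.Dict.getD_empty]
  set cw := (fight.toList.count 'w' : Int)
  set cp := (fight.toList.count 'p' : Int)
  set cb := (fight.toList.count 'b' : Int)
  set cs := (fight.toList.count 's' : Int)
  set cm := (fight.toList.count 'm' : Int)
  set cq := (fight.toList.count 'q' : Int)
  set cd := (fight.toList.count 'd' : Int)
  set cz := (fight.toList.count 'z' : Int)
  split_ifs <;> simp_all <;> omega
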